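-- pv_equiv track=rewrite | github.com/alishalabi/practice_2024 | coding_problems/letters_shared.py | shared_letters
-- ===== SOURCE A (Python) =====
-- def shared_letters(string1, string2):
--     string1_dict = {}
--     ret = 0
--     for letter in string1:
--         if letter not in string1_dict:
--             string1_dict[letter] = 1
--         else:
--             string1_dict[letter] += 1
--     for letter in string2:
--         if letter in string1_dict and string1_dict[letter] > 0:
--             ret += 1
--             string1_dict[letter] -= 1
--     return ret
-- ===== SOURCE B (Python) =====
-- def shared_letters(string1, string2):
--     count1 = {}
--     for ch in string1:
--         count1[ch] = count1.get(ch, 0) + 1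
--     count2 = {}
--     for ch in string2:
--         count2[ch] = count2.get(ch, 0) + 1
--     return sum(min(v, count2.get(ch, 0)) for ch, v in count1.items())
-- ===== Notes on version B (the rewrite author's own statement) =====
-- stated objective: simpler
-- what changed: Instead of mutating string1's count table while consuming string2, B builds independent frequency tables for both strings and returns the sum over string1's distinct letters of min(count1[c], count2[c]).
import Mathlib
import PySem

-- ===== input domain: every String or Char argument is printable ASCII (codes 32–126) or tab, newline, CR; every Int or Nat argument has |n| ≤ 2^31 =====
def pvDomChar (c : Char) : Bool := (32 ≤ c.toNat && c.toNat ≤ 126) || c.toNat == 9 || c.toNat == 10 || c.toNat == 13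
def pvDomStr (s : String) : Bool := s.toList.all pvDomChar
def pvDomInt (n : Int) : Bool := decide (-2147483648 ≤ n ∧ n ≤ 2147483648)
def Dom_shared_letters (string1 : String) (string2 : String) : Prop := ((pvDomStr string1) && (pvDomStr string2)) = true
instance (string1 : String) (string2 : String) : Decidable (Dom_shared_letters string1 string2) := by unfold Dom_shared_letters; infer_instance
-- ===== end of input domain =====

-- B replaces A's destructive consume loop by two independent frequency tables and a
-- final sum of per-letter minima (objective: simpler).

-- ===== PORT A =====
def shared_letters (string1 : String) (string2 : String) : Int :=
  let string1_dict : PySem.Dict Char Int :=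
    string1.toList.foldl (fun d letter =>
      if d.contains letter = false then d.insert letter 1
      else d.insert letter (d.getD letter 0 + 1)) PySem.Dict.empty
  let st := string2.toList.foldl (fun (st : Int × PySem.Dict Char Int) letter =>
      if st.2.contains letter && decide (st.2.getD letter 0 > 0)
      then (st.1 + 1, st.2.insert letter (st.2.getD letter 0 - 1))
      else st) ((0 : Int), string1_dict)
  st.1

-- ===== PORT B =====
def shared_letters_alt (string1 : String) (string2 : String) : Int :=
  let count1 : PySem.Dict Char Int :=
    string1.toList.foldl (fun d ch => d.insert ch (d.getD ch 0 + 1)) PySem.Dict.empty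
  let count2 : PySem.Dict Char Int :=
    string2.toList.foldl (fun d ch => d.insert ch (d.getD ch 0 + 1)) PySem.Dict.empty
  (count1.items.map (fun p => min p.2 (count2.getD p.1 0))).sum

-- ===== PRECONDITION & SPEC =====
def Spec_shared_letters (string1 : String) (string2 : String) (out : Int) : Prop := out = shared_letters_alt string1 string2
instance (string1 : String) (string2 : String) (out : Int) : Decidable (Spec_shared_letters string1 string2 out) := by unfold Spec_shared_letters; infer_instance

-- ===== CLAIM (what is proved, stated in full; the proofs are below) =====
def Claim_equal_shared_letters : Prop := ∀ (string1 : String) (string2 : String), Dom_shared_letters string1 string2 → Spec_shared_letters string1 string2 (shared_letters string1 string2)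

-- ===== LEMMAS AND PROOFS =====

-- Bumping one entry of a sum over a duplicate-free key list.
theorem sum_map_bump (ks : List Char) (c : Char) (f g : Char → Int)
    (hc : c ∈ ks) (hnd : ks.Nodup)
    (hne : ∀ k, k ≠ c → f k = g k) (hfc : f c = 1 + g c) :
    (ks.map f).sum = 1 + (ks.map g).sum := by
  induction ks with
  | nil => cases hc
  | cons k t ih =>
    simp only [List.map_cons, List.sum_cons]
    rcases List.mem_cons.mp hc with h | h
    · subst h
      have : t.map f = t.map g := List.map_congr_left fun x hx =>
        hne x (fun hxk => (List.nodup_cons.mp hnd).1 (hxk ▸ hx))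
      rw [this, hfc]; ring
    · have hkc : k ≠ c := fun hkc => (List.nodup_cons.mp hnd).1 (hkc ▸ h)
      rw [hne k hkc, ih h (List.nodup_cons.mp hnd).2]; ring

-- The invariant of A's consume loop: it adds, over the (duplicate-free) keys of the
-- current table, min(positive part of the stored value, multiplicity in the rest of string2).
theorem consume_loop_eq (l2 : List Char) : ∀ (ret : Int) (d : PySem.Dict Char Int),
    d.keys.Nodup →
    (l2.foldl (fun (st : Int × PySem.Dict Char Int) letter =>
        if st.2.contains letter && decide (st.2.getD letter 0 > 0)
        then (st.1 + 1, st.2.insert letter (st.2.getD letter 0 - 1))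
        else st) (ret, d)).1
      = ret + (d.keys.map (fun k => min (max (d.getD k 0) 0) ((l2.count k : Nat) : Int))).sum := by
  induction l2 with
  | nil => intro ret d hnd; simp
  | cons c cs ih =>
    intro ret d hnd
    simp only [List.foldl_cons]
    by_cases hcond : d.contains c = true ∧ d.getD c 0 > 0
    · have hb : (d.contains c && decide (d.getD c 0 > 0)) = true := by
        simp [hcond.1, hcond.2]
      rw [if_pos hb]
      have hkeys : (d.insert c (d.getD c 0 - 1)).keys = d.keys :=
        PySem.Dict.keys_insert_of_contains _ _ hcond.1
      have hnd' : (d.insert c (d.getD c 0 - 1)).keys.Nodup := hkeys ▸ hnd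
      rw [ih (ret + 1) _ hnd', hkeys]
      have hmem : c ∈ d.keys := (PySem.Dict.contains_iff_mem_keys _ _).mp hcond.1
      have hbump : (d.keys.map (fun k => min (max (d.getD k 0) 0) ((c :: cs).count k : Int))).sum
          = 1 + (d.keys.map (fun k => min (max ((d.insert c (d.getD c 0 - 1)).getD k 0) 0) ((cs.count k : Nat) : Int))).sum := by
        apply sum_map_bump _ c _ _ hmem hnd
        · intro k hk
          rw [PySem.Dict.getD_insert_of_ne _ _ _ hk]
          simp [Ne.symm hk]
        · rw [PySem.Dict.getD_insert_self, List.count_cons_self]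
          have := hcond.2
          push_cast
          omega
      rw [hbump]; ring
    · have hb : (d.contains c && decide (d.getD c 0 > 0)) = false := by
        by_cases h1 : d.contains c = true
        · have h2 : ¬ d.getD c 0 > 0 := fun h => hcond ⟨h1, h⟩
          simp [h1, h2]
        · have h1' : d.contains c = false := by simpa using h1
          simp [h1']
      rw [if_neg (by simp [hb])]
      rw [ih ret d hnd]
      congr 2
      apply List.map_congr_left
      intro k hk
      by_cases hkc : k = c
      · subst hkc
        have h1 : d.contains k = true := (PySem.Dict.contains_iff_mem_keys _ _).mpr hk
        have h2 : ¬ d.getD k 0 > 0 := fun h => hcond ⟨h1, h⟩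
        have h3 : max (d.getD k 0) 0 = 0 := by omega
        simp [h3]
        positivity
      · simp [Ne.symm hkc]

-- A's first loop builds exactly the counter of string1.
theorem build_eq_counter (l1 : List Char) :
    l1.foldl (fun (d : PySem.Dict Char Int) letter =>
      if d.contains letter = false then d.insert letter 1
      else d.insert letter (d.getD letter 0 + 1)) PySem.Dict.empty
    = PySem.Dict.counter l1 := by
  rw [← PySem.Dict.foldl_insert_getD_add_one_eq_counter]
  apply PySem.List.foldl_congr_mem
  intro d x _
  by_cases h : d.contains x = true
  · simp [h]
  · have hf : d.contains x = false := by simpa using h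
    rw [if_pos hf, PySem.Dict.getD_of_not_contains _ _ hf]
    norm_num

theorem shared_letters_eq_alt (string1 string2 : String) :
    shared_letters string1 string2 = shared_letters_alt string1 string2 := by
  unfold shared_letters shared_letters_alt
  dsimp only
  rw [build_eq_counter, PySem.Dict.foldl_insert_getD_add_one_eq_counter,
      PySem.Dict.foldl_insert_getD_add_one_eq_counter,
      consume_loop_eq _ 0 _ (PySem.Dict.nodup_keys_counter _)]
  rw [zero_add, PySem.Dict.items_counter, List.map_map, PySem.Dict.keys_counter]
  apply congrArg
  apply List.map_congr_left
  intro k _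
  simp only [Function.comp_apply, PySem.Dict.getD_counter]
  congr 1
  have : (0:Int) ≤ (string1.toList.count k : Int) := by positivity
  omega

-- ===== VERDICT (by name: the statement is the Claim_ definition above) =====
theorem shared_letters_spec : Claim_equal_shared_letters := by
  intro s1 s2 _
  unfold Spec_shared_letters
  exact shared_letters_eq_alt s1 s2
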